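-- pv_equiv track=rewrite | github.com/RoryPoulter/SAT-Solver | rlnf55.py | check_satisfies
-- ===== SOURCE A (Python) =====
-- def check_satisfies(clause_set: list[list[int]], assignment: list[int]) -> bool:
--     """Checks if an assignment satisfies a clause-set
--
--     Args:
--         clause_set (list[list[int]]): The clause-set to be satisfied
--         assignment (list[int]): The assignment to be tested
--
--     Returns:
--         bool: If the assignment is satisfying
--     """
--     for literal in assignment:
--         # Creates new clause-set with satisfied clauses removed
--         new_clause_set = []
--         for clause in clause_set:
--             # Only append unsatisfied clauses
--             if literal not in clause:
--                 new_clause_set.append(clause)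
--         clause_set = new_clause_set
--         if not clause_set:
--             return True
--     return False
-- ===== SOURCE B (Python) =====
-- def check_satisfies(clause_set: list[list[int]], assignment: list[int]) -> bool:
--     return bool(assignment) and all(
--         any(x in assignment for x in clause) for clause in clause_set
--     )
-- ===== Notes on version B (the rewrite author's own statement) =====
-- stated objective: simpler
-- what changed: B checks each clause directly for a literal contained in the assignment (one pass over clauses, no state), instead of A's loop over assignment literals that repeatedly rebuilds a shrinking remaining-clause list; the empty-assignment->False behaviour is kept via the bool(assignment) guard.
import Mathlib
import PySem

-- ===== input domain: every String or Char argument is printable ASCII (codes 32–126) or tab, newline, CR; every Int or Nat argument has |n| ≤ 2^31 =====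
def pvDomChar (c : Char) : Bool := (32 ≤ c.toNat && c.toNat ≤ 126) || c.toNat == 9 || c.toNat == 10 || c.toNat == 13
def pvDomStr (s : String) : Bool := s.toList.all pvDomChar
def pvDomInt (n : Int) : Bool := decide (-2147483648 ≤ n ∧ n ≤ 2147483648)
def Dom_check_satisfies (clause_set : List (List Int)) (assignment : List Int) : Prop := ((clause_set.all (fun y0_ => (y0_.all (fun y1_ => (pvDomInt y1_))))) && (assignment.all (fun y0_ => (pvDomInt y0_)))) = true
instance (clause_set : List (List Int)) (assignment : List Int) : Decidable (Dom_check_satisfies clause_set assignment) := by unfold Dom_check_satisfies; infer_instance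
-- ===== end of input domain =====

-- B replaces A's loop over assignment literals (repeatedly rebuilding a shrinking
-- clause list) by a direct check that every clause contains some assignment literal,
-- guarded by the assignment being nonempty (objective: simpler).

-- ===== PORT A =====
-- the 'for literal in assignment' loop; state = the current clause_set
def csA_loop : List (List Int) → List Int → Bool
  | _, [] => false
  | clause_set, literal :: rest =>
    -- inner loop: new_clause_set built by appending unsatisfied clauses
    let new_clause_set :=
      clause_set.foldl (fun acc clause =>
        if !clause.contains literal then acc ++ [clause] else acc) []
    if new_clause_set.isEmpty then true else csA_loop new_clause_set rest

def check_satisfies (clause_set : List (List Int)) (assignment : List Int) : Bool :=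
  csA_loop clause_set assignment

-- ===== PORT B =====
def check_satisfies_alt (clause_set : List (List Int)) (assignment : List Int) : Bool :=
  !assignment.isEmpty &&
    clause_set.all (fun clause => clause.any (fun x => assignment.contains x))

-- ===== PRECONDITION & SPEC =====
def Spec_check_satisfies (clause_set : List (List Int)) (assignment : List Int) (out : Bool) : Prop := out = check_satisfies_alt clause_set assignment
instance (clause_set : List (List Int)) (assignment : List Int) (out : Bool) : Decidable (Spec_check_satisfies clause_set assignment out) := by unfold Spec_check_satisfies; infer_instance

-- ===== CLAIM (what is proved, stated in full; the proofs are below) =====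
def Claim_equal_check_satisfies : Prop := ∀ (clause_set : List (List Int)) (assignment : List Int), Dom_check_satisfies clause_set assignment → Spec_check_satisfies clause_set assignment (check_satisfies clause_set assignment)

-- ===== LEMMAS AND PROOFS =====

theorem csA_all_filter (l : Int) (q : List Int → Bool) :
    ∀ cs : List (List Int),
      ((cs.filter (fun c => !c.contains l)).all q) = cs.all (fun c => c.contains l || q c) := by
  intro cs
  induction cs with
  | nil => rfl
  | cons c cs ih =>
    by_cases hc : l ∈ c
    · simp [hc]
    · simp [hc]

theorem csA_any_cons (l : Int) (rest : List Int) (clause : List Int) :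
    (clause.any fun x => (l :: rest).contains x) =
      (clause.contains l || clause.any fun x => rest.contains x) := by
  rw [Bool.eq_iff_iff]
  simp only [List.any_eq_true, Bool.or_eq_true, List.contains_eq_mem,
    decide_eq_true_eq, List.mem_cons]
  aesop

theorem csA_loop_eq (assignment : List Int) :
    ∀ clause_set : List (List Int),
      csA_loop clause_set assignment =
        (!assignment.isEmpty &&
          clause_set.all (fun clause => clause.any (fun x => assignment.contains x))) := by
  induction assignment with
  | nil => intro cs; simp [csA_loop]
  | cons l rest ih =>
    intro cs
    rw [csA_loop]
    simp only [PySem.List.foldl_append_if_eq_filter, List.nil_append]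
    by_cases h : (cs.filter (fun clause => !clause.contains l)).isEmpty
    · rw [if_pos h]
      rw [List.isEmpty_iff, List.filter_eq_nil_iff] at h
      simp only [List.isEmpty_cons, Bool.not_false, Bool.true_and]
      symm
      rw [List.all_eq_true]
      intro c hc
      have hcl : l ∈ c := by
        have := h c hc; simpa using this
      rw [List.any_eq_true]
      exact ⟨l, hcl, by simp⟩
    · rw [if_neg h, ih]
      rw [List.isEmpty_iff, ← Ne, List.ne_nil_iff_exists_cons] at h
      obtain ⟨c0, cs0, hf⟩ := h
      have hm : c0 ∈ cs.filter (fun clause => !clause.contains l) := by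
        rw [hf]; exact List.mem_cons_self
      have hc0 : c0 ∈ cs := List.mem_of_mem_filter hm
      have hc0l : c0.contains l = false := by
        have := List.of_mem_filter hm; simpa using this
      cases rest with
      | nil =>
        simp only [List.isEmpty_nil, Bool.not_true, Bool.false_and,
          List.isEmpty_cons, Bool.not_false, Bool.true_and]
        symm
        rw [← Bool.not_eq_true, List.all_eq_true]
        intro hall
        have := hall c0 hc0
        rw [csA_any_cons] at this
        simp at this
        exact absurd this (by simpa using hc0l)
      | cons r rs =>
        simp only [List.isEmpty_cons, Bool.not_false, Bool.true_and]
        rw [csA_all_filter]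
        simp only [csA_any_cons]
-- ===== VERDICT (by name: the statement is the Claim_ definition above) =====
theorem check_satisfies_spec : Claim_equal_check_satisfies := by
  intro cs asg _
  unfold Spec_check_satisfies check_satisfies check_satisfies_alt
  exact csA_loop_eq asg cs
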